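-- pv_equiv track=rewrite | github.com/livingwillowtree/psivs_willowtree | injection_scanner/injector.py | parse_finding
-- ===== SOURCE A (Python) =====
-- def parse_finding(output, url, vuln_type):
--     param = None
--
--     for line in output.splitlines():
--         if line.lower().startswith("param:"):
--             param = line.split(":", 1)[1].strip()
--
--     if not param:
--         return None
--
--     return {
--         "type": vuln_type,
--         "url": url,
--         "param": param,
--         "suggestion": "Taint user input"
--     }
-- ===== SOURCE B (Python) =====
-- def parse_finding(output, url, vuln_type):
--     param = None
--
--     # scan backwards: the first match from the end is A's last match
--     for line in reversed(output.splitlines()):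
--         if line.lower().startswith("param:"):
--             param = line.split(":", 1)[1].strip()
--             break
--
--     if not param:
--         return None
--
--     return {
--         "type": vuln_type,
--         "url": url,
--         "param": param,
--         "suggestion": "Taint user input"
--     }
-- ===== Notes on version B (the rewrite author's own statement) =====
-- stated objective: alternative
-- what changed: B scans the lines in reverse and stops at the first 'param:' line (early exit), instead of A's forward scan that keeps overwriting to retain the last match.
import Mathlib
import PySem

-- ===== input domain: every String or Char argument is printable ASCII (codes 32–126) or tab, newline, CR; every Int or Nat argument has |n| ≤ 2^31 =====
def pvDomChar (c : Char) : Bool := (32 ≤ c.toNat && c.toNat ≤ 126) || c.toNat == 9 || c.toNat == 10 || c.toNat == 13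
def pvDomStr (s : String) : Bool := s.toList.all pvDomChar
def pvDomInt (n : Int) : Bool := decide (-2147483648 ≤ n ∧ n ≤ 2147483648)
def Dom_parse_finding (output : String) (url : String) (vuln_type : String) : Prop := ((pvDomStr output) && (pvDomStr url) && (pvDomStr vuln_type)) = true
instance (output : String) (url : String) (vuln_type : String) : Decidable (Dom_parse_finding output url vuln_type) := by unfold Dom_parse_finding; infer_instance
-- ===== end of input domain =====

-- B replaces A's forward scan that keeps the LAST 'param:' match by a reverse scan
-- that stops at the FIRST match (early exit); same return value (alternative decomposition).

-- shared helpers: both Pythons test/extract a line with the identical expressions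
-- line.lower().startswith("param:") and line.split(":", 1)[1].strip()
def pvIsParamLine (line : String) : Bool :=
  PySem.Str.startswith (PySem.Str.lower line) "param:"

-- line.split(":", 1)[1].strip(); the none branches (empty sep / IndexError) are
-- unreachable when pvIsParamLine holds, since the line then contains a ':'
def pvParamValue? (line : String) : Option String :=
  match PySem.Str.splitMax? line ":" 1 with
  | none => none
  | some pieces =>
    match PySem.List.pyGet? pieces 1 with
    | none => none
    | some v => some (PySem.Str.strip v)

-- ===== PORT A =====
def parse_finding (output : String) (url : String) (vuln_type : String) : Option (List (String × String)) :=
  let param : Option String :=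
    (PySem.Str.splitlines output).foldl
      (fun p line =>
        if pvIsParamLine line then
          match pvParamValue? line with
          | some v => some v
          | none => p
        else p)
      none
  match param with
  | none => none
  | some p =>
    if p = "" then none
    else some [("type", vuln_type), ("url", url), ("param", p), ("suggestion", "Taint user input")]

-- ===== PORT B =====
-- first match while walking the (reversed) line list, early exit
def pvFindParamRev : List String → Option String
  | [] => none
  | line :: rest =>
    if pvIsParamLine line then
      match pvParamValue? line with
      | some v => some v
      | none => pvFindParamRev rest
    else pvFindParamRev rest

def parse_finding_alt (output : String) (url : String) (vuln_type : String) : Option (List (String × String)) :=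
  match pvFindParamRev (PySem.Str.splitlines output).reverse with
  | none => none
  | some p =>
    if p = "" then none
    else some [("type", vuln_type), ("url", url), ("param", p), ("suggestion", "Taint user input")]

-- ===== PRECONDITION & SPEC =====
def Spec_parse_finding (output : String) (url : String) (vuln_type : String) (out : Option (List (String × String))) : Prop := out = parse_finding_alt output url vuln_type
instance (output : String) (url : String) (vuln_type : String) (out : Option (List (String × String))) : Decidable (Spec_parse_finding output url vuln_type out) := by unfold Spec_parse_finding; infer_instance

-- ===== CLAIM (what is proved, stated in full; the proofs are below) =====
def Claim_equal_parse_finding : Prop := ∀ (output : String) (url : String) (vuln_type : String), Dom_parse_finding output url vuln_type → Spec_parse_finding output url vuln_type (parse_finding output url vuln_type)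

-- ===== LEMMAS AND PROOFS =====

-- one step of A's fold, as an init-independent value
def pvStep1 (line : String) : Option String :=
  if pvIsParamLine line then
    match pvParamValue? line with
    | some v => some v
    | none => none
  else none

lemma pvFindParamRev_append (xs : List String) (l : String) :
    pvFindParamRev (xs ++ [l]) =
      match pvFindParamRev xs with
      | some v => some v
      | none => pvStep1 l := by
  induction xs with
  | nil => simp [pvFindParamRev, pvStep1]
  | cons x xs ih =>
    simp only [List.cons_append, pvFindParamRev]
    by_cases h : pvIsParamLine x
    · simp only [h, if_true]
      cases hv : pvParamValue? x <;> simp [ih]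
    · simp [h, ih]

lemma pv_fold_eq_revFind (lines : List String) :
    ∀ init : Option String,
      lines.foldl
        (fun p line =>
          if pvIsParamLine line then
            match pvParamValue? line with
            | some v => some v
            | none => p
          else p) init =
      match pvFindParamRev lines.reverse with
      | some v => some v
      | none => init := by
  induction lines with
  | nil => intro init; simp [pvFindParamRev]
  | cons l ls ih =>
    intro init
    simp only [List.foldl_cons, List.reverse_cons, pvFindParamRev_append, ih]
    cases hr : pvFindParamRev ls.reverse with
    | some v => simp
    | none =>
      simp only [pvStep1]
      by_cases h : pvIsParamLine l
      · simp only [h, if_true]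
        cases hv : pvParamValue? l <;> simp
      · simp [h]

-- ===== VERDICT (by name: the statement is the Claim_ definition above) =====
theorem parse_finding_spec : Claim_equal_parse_finding := by
  intro output url vuln_type _
  unfold Spec_parse_finding parse_finding parse_finding_alt
  rw [pv_fold_eq_revFind]
  cases hr : pvFindParamRev (PySem.Str.splitlines output).reverse <;> simp
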